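-- pv_equiv track=rewrite | github.com/chymaera96/ProbabilisticMelodyGenerator | generate.py | compute_legal_notes
-- ===== SOURCE A (Python) =====
-- def compute_legal_notes(unotes, illegal_notes):
--     noteset = []
--     for ix in range(3,6):
--         for n in illegal_notes:
--             nt = n + str(ix)
--             noteset.append(nt)
--
--     legal_notes = [n for n in unotes if n not in noteset]
--     return legal_notes
-- ===== SOURCE B (Python) =====
-- def compute_legal_notes(unotes, illegal_notes):
--     illegal = set(illegal_notes)
--     return [n for n in unotes
--             if not (n[-1:] in ('3', '4', '5') and n[:-1] in illegal)]
-- ===== Notes on version B (the rewrite author's own statement) =====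
-- stated objective: faster
-- what changed: A materializes the full noteset of every illegal name combined with octaves 3-5 in nested loops and filters each note by an O(i) list-membership scan; B never builds that table: it parses each note directly (last char in '345', prefix in a set of illegal names) with slice indexing so empty notes stay safe.
import Mathlib
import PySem

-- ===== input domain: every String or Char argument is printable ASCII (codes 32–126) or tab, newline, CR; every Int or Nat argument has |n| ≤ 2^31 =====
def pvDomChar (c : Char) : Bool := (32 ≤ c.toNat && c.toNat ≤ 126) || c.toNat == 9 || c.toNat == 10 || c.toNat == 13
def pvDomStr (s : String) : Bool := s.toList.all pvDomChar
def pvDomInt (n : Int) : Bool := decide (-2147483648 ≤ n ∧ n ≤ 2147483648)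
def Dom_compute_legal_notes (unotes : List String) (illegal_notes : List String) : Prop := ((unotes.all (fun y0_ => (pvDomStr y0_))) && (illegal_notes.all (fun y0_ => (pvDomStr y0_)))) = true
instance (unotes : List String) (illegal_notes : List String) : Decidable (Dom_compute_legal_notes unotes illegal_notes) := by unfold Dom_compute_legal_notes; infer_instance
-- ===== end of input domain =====

-- B is simpler: instead of materializing the full name×octave combination table in a nested
-- loop, it tests each note directly (last character in '345' and prefix in a set of illegal names).

-- ===== PORT A =====
-- literal port: build noteset by the nested loops, then filter unotes by membership
def compute_legal_notes (unotes : List String) (illegal_notes : List String) : List String :=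
  let noteset : List String :=
    (PySem.List.pyRange 3 6 1).foldl
      (fun acc ix => illegal_notes.foldl (fun acc n => acc ++ [n ++ PySem.Int.toStr ix]) acc) []
  unotes.filter (fun n => !(noteset.contains n))

-- ===== PORT B =====
-- literal port of Source B: a set of illegal names; keep n unless n[-1:] ∈ {'3','4','5'} and n[:-1] is illegal
def compute_legal_notes_alt (unotes : List String) (illegal_notes : List String) : List String :=
  let illegal : PySem.Set String := PySem.Set.ofList illegal_notes
  unotes.filter (fun n =>
    let last := PySem.List.slice n.toList (some (-1)) none      -- n[-1:]
    let pre  := PySem.List.slice n.toList none (some (-1))      -- n[:-1]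
    !((last == ['3'] || last == ['4'] || last == ['5']) &&
      PySem.Set.contains illegal (String.ofList pre)))

-- ===== PRECONDITION & SPEC =====
def Spec_compute_legal_notes (unotes : List String) (illegal_notes : List String) (out : List String) : Prop := out = compute_legal_notes_alt unotes illegal_notes
instance (unotes : List String) (illegal_notes : List String) (out : List String) : Decidable (Spec_compute_legal_notes unotes illegal_notes out) := by unfold Spec_compute_legal_notes; infer_instance

-- ===== CLAIM (what is proved, stated in full; the proofs are below) =====
def Claim_equal_compute_legal_notes : Prop := ∀ (unotes : List String) (illegal_notes : List String), Dom_compute_legal_notes unotes illegal_notes → Spec_compute_legal_notes unotes illegal_notes (compute_legal_notes unotes illegal_notes)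

-- ===== LEMMAS AND PROOFS =====

-- a note equals some illegal name with the single-character suffix c
-- iff its last character is c and its prefix is an illegal name
theorem pv_suffix_char (il : List String) (s : String) (c : Char) :
    (∃ n ∈ il, n ++ String.ofList [c] = s) ↔
      (s.toList.drop (s.toList.length - 1) = [c] ∧ String.ofList s.toList.dropLast ∈ il) := by
  constructor
  · rintro ⟨n, hn, rfl⟩
    simp [List.drop_left', hn]
  · rintro ⟨hdrop, hmem⟩
    refine ⟨String.ofList s.toList.dropLast, hmem, ?_⟩
    have hsplit : s.toList = s.toList.dropLast ++ [c] := by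
      conv_lhs => rw [← List.take_append_drop (s.toList.length - 1) s.toList]
      rw [hdrop, List.dropLast_eq_take]
    have : String.ofList s.toList.dropLast ++ String.ofList [c]
        = String.ofList (s.toList.dropLast ++ [c]) := by
      simp
    rw [this, ← hsplit]; simp

theorem pv_pred_eq (il : List String) (s : String) :
    ((((PySem.List.pyRange 3 6 1).foldl
        (fun acc ix => il.foldl (fun acc n => acc ++ [n ++ PySem.Int.toStr ix]) acc) []).contains s))
    = ((PySem.List.slice s.toList (some (-1)) none == ['3']
        || PySem.List.slice s.toList (some (-1)) none == ['4']
        || PySem.List.slice s.toList (some (-1)) none == ['5'])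
       && PySem.Set.contains (PySem.Set.ofList il) (String.ofList (PySem.List.slice s.toList none (some (-1))))) := by
  have hrange : PySem.List.pyRange 3 6 1 = [(3:Int),4,5] := by decide
  rw [hrange]
  simp only [List.foldl, PySem.List.foldl_append_singleton_eq_map]
  rw [Bool.eq_iff_iff]
  simp only [List.contains_iff_mem, List.mem_append, List.mem_map, Bool.and_eq_true,
    Bool.or_eq_true, beq_iff_eq, PySem.List.slice_from_neg_one, PySem.List.slice_to_neg_one,
    PySem.Set.contains, List.nil_append]
  have e3 : PySem.Int.toStr 3 = String.ofList ['3'] := by decide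
  have e4 : PySem.Int.toStr 4 = String.ofList ['4'] := by decide
  have e5 : PySem.Int.toStr 5 = String.ofList ['5'] := by decide
  rw [e3, e4, e5]
  simp only [PySem.Set.mem_ofList, pv_suffix_char]
  tauto

-- ===== VERDICT (by name: the statement is the Claim_ definition above) =====
theorem compute_legal_notes_spec : Claim_equal_compute_legal_notes := by
  intro unotes il _
  unfold Spec_compute_legal_notes compute_legal_notes compute_legal_notes_alt
  refine List.filter_congr (fun s _ => ?_)
  rw [pv_pred_eq il s]
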